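-- pv_equiv track=rewrite | github.com/Naruto-67/yt-automation-engine | scripts/youtube_manager.py | _get_creator_comment
-- ===== SOURCE A (Python) =====
-- def _get_creator_comment(niche):
--     niche_lower = niche.lower() if niche else ""
--     if any(k in niche_lower for k in ['storytelling', 'moral', 'pixar', 'anime', 'animation', 'fictional', 'story']):
--         return "Which part of the story hit you the hardest? 👇 Subscribe for more stories like this. ✨"
--     elif any(k in niche_lower for k in ['fact', 'hack', 'science', 'weird', 'educational', 'education']):
--         return "Which fact blew your mind the most? Drop it below and subscribe for more! 🧠✨"
--     elif any(k in niche_lower for k in ['horror', 'terror', 'eldritch', 'cosmic horror']):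
--         return "What cosmic horror keeps YOU up at night? Tell us below! 😱 Subscribe for more existential dread."
--     elif any(k in niche_lower for k in ['alien', 'extraterrestrial', 'encounter']):
--         return "Do you think we're alone in the universe? Reply with your theory and subscribe! 👽🌌"
--     elif any(k in niche_lower for k in ['space', 'stellar', 'cosmic', 'galactic', 'planetary', 'nebula', 'pulsar']):
--         return "Which corner of the cosmos should we explore next? Comment below and subscribe! 🚀🌠"
--     elif any(k in niche_lower for k in ['dream', 'dimensional', 'quantum', 'simulation']):
--         return "Does reality feel stranger after this? Share your thoughts and subscribe for more mind-bending content! 🌀"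
--     elif any(k in niche_lower for k in ['tech', 'ai', 'automation', 'future']):
--         return "How long until AI takes over this job entirely? Let me know below and subscribe! 🤖⚡"
--     else:
--         return "What should we explore next? Drop your idea below and subscribe for more! 🌟"
-- ===== SOURCE B (Python) =====
-- KEYWORD_GROUPS = [
--     ['storytelling', 'moral', 'pixar', 'anime', 'animation', 'fictional', 'story'],
--     ['fact', 'hack', 'science', 'weird', 'educational', 'education'],
--     ['horror', 'terror', 'eldritch', 'cosmic horror'],
--     ['alien', 'extraterrestrial', 'encounter'],
--     ['space', 'stellar', 'cosmic', 'galactic', 'planetary', 'nebula', 'pulsar'],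
--     ['dream', 'dimensional', 'quantum', 'simulation'],
--     ['tech', 'ai', 'automation', 'future'],
-- ]
--
-- COMMENTS = [
--     "Which part of the story hit you the hardest? \U0001F447 Subscribe for more stories like this. \u2728",
--     "Which fact blew your mind the most? Drop it below and subscribe for more! \U0001F9E0\u2728",
--     "What cosmic horror keeps YOU up at night? Tell us below! \U0001F631 Subscribe for more existential dread.",
--     "Do you think we're alone in the universe? Reply with your theory and subscribe! \U0001F47D\U0001F30C",
--     "Which corner of the cosmos should we explore next? Comment below and subscribe! \U0001F680\U0001F320",
--     "Does reality feel stranger after this? Share your thoughts and subscribe for more mind-bending content! \U0001F300",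
--     "How long until AI takes over this job entirely? Let me know below and subscribe! \U0001F916\u26A1",
--     "What should we explore next? Drop your idea below and subscribe for more! \U0001F31F",
-- ]
--
-- # One flat keyword -> priority index, built once from the groups.
-- KEYWORD_PRIORITY = [(kw, p) for p, kws in enumerate(KEYWORD_GROUPS) for kw in kws]
--
--
-- def _get_creator_comment(niche):
--     niche_lower = niche.lower() if niche else ""
--     best = min((p for kw, p in KEYWORD_PRIORITY if kw in niche_lower),
--                default=len(COMMENTS) - 1)
--     return COMMENTS[best]
-- ===== Notes on version B (the rewrite author's own statement) =====
-- stated objective: alternative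
-- what changed: Replaces the early-return if/elif cascade of group-level any() tests with a single flat scan over a keyword->priority list that collects ALL matching priorities and returns the comment of the minimum one (default index if none match).
import Mathlib
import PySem

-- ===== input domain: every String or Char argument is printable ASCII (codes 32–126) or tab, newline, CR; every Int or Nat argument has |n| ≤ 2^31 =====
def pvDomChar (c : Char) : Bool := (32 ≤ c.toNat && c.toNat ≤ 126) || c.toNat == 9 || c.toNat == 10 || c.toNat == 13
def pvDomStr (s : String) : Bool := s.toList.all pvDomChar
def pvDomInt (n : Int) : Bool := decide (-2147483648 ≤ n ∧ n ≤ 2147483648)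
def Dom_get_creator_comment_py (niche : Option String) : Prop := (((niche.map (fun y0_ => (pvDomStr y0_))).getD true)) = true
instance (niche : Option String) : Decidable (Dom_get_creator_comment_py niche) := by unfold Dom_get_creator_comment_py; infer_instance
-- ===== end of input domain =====

-- B replaces A's early-return if/elif cascade by a flat scan collecting ALL matching keyword priorities and returning the comment of the minimum one (alternative decomposition, same cost).

-- ===== PORT A =====
def get_creator_comment_py (niche : Option String) : String :=
  let niche_lower :=
    match niche with
    | none => ""
    | some s => if s = "" then "" else PySem.Str.lower s
  if (["storytelling", "moral", "pixar", "anime", "animation", "fictional", "story"] : List String).any (fun k => PySem.Str.isIn k niche_lower) then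
    "Which part of the story hit you the hardest? 👇 Subscribe for more stories like this. ✨"
  else
  if (["fact", "hack", "science", "weird", "educational", "education"] : List String).any (fun k => PySem.Str.isIn k niche_lower) then
    "Which fact blew your mind the most? Drop it below and subscribe for more! 🧠✨"
  else
  if (["horror", "terror", "eldritch", "cosmic horror"] : List String).any (fun k => PySem.Str.isIn k niche_lower) then
    "What cosmic horror keeps YOU up at night? Tell us below! 😱 Subscribe for more existential dread."
  else
  if (["alien", "extraterrestrial", "encounter"] : List String).any (fun k => PySem.Str.isIn k niche_lower) then
    "Do you think we're alone in the universe? Reply with your theory and subscribe! 👽🌌"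
  else
  if (["space", "stellar", "cosmic", "galactic", "planetary", "nebula", "pulsar"] : List String).any (fun k => PySem.Str.isIn k niche_lower) then
    "Which corner of the cosmos should we explore next? Comment below and subscribe! 🚀🌠"
  else
  if (["dream", "dimensional", "quantum", "simulation"] : List String).any (fun k => PySem.Str.isIn k niche_lower) then
    "Does reality feel stranger after this? Share your thoughts and subscribe for more mind-bending content! 🌀"
  else
  if (["tech", "ai", "automation", "future"] : List String).any (fun k => PySem.Str.isIn k niche_lower) then
    "How long until AI takes over this job entirely? Let me know below and subscribe! 🤖⚡"
  else
    "What should we explore next? Drop your idea below and subscribe for more! 🌟"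

-- ===== PORT B =====
def pvGroups : List (List String) :=
[ ["storytelling", "moral", "pixar", "anime", "animation", "fictional", "story"],
  ["fact", "hack", "science", "weird", "educational", "education"],
  ["horror", "terror", "eldritch", "cosmic horror"],
  ["alien", "extraterrestrial", "encounter"],
  ["space", "stellar", "cosmic", "galactic", "planetary", "nebula", "pulsar"],
  ["dream", "dimensional", "quantum", "simulation"],
  ["tech", "ai", "automation", "future"] ]

def pvComments : List String :=
[ "Which part of the story hit you the hardest? 👇 Subscribe for more stories like this. ✨",
  "Which fact blew your mind the most? Drop it below and subscribe for more! 🧠✨",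
  "What cosmic horror keeps YOU up at night? Tell us below! 😱 Subscribe for more existential dread.",
  "Do you think we're alone in the universe? Reply with your theory and subscribe! 👽🌌",
  "Which corner of the cosmos should we explore next? Comment below and subscribe! 🚀🌠",
  "Does reality feel stranger after this? Share your thoughts and subscribe for more mind-bending content! 🌀",
  "How long until AI takes over this job entirely? Let me know below and subscribe! 🤖⚡",
  "What should we explore next? Drop your idea below and subscribe for more! 🌟" ]

-- KEYWORD_PRIORITY = [(kw, p) for p, kws in enumerate(KEYWORD_GROUPS) for kw in kws]
def pvKeywordPriority : List (String × Nat) :=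
  (pvGroups.zipIdx).flatMap (fun g => g.1.map (fun k => (k, g.2)))

def get_creator_comment_py_alt (niche : Option String) : String :=
  let niche_lower :=
    match niche with
    | none => ""
    | some s => if s = "" then "" else PySem.Str.lower s
  -- min((p for kw, p in KEYWORD_PRIORITY if kw in niche_lower), default=len(COMMENTS)-1)
  let best :=
    (PySem.List.min?
      (pvKeywordPriority.filterMap
        (fun kp => if PySem.Str.isIn kp.1 niche_lower then some kp.2 else none))
      (fun p => p)).getD (pvComments.length - 1)
  pvComments.getD best ""

-- ===== PRECONDITION & SPEC =====
def Spec_get_creator_comment_py (niche : Option String) (out : String) : Prop := out = get_creator_comment_py_alt niche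
instance (niche : Option String) (out : String) : Decidable (Spec_get_creator_comment_py niche out) := by unfold Spec_get_creator_comment_py; infer_instance

-- ===== CLAIM (what is proved, stated in full; the proofs are below) =====
def Claim_equal_get_creator_comment_py : Prop := ∀ (niche : Option String), Dom_get_creator_comment_py niche → Spec_get_creator_comment_py niche (get_creator_comment_py niche)

-- ===== LEMMAS AND PROOFS =====

-- Matching priorities of the flattened (keyword, priority) list built from `gs` starting at offset `off`.
def pvMatches (nl : String) (gs : List (List String)) (off : Nat) : List Nat :=
  ((gs.zipIdx off).flatMap (fun g => g.1.map (fun k => (k, g.2)))).filterMap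
    (fun kp => if PySem.Str.isIn kp.1 nl then some kp.2 else none)

-- Index of the first group (from offset `off`) containing a matching keyword: A's cascade shape.
def pvFirstIdx (nl : String) : List (List String) → Nat → Option Nat
  | [], _ => none
  | g :: gs, off =>
      if g.any (fun k => PySem.Str.isIn k nl) then some off else pvFirstIdx nl gs (off + 1)

theorem pvMatches_cons (nl : String) (g : List String) (gs : List (List String)) (off : Nat) :
    pvMatches nl (g :: gs) off =
      g.filterMap (fun k => if PySem.Str.isIn k nl then some off else none) ++
        pvMatches nl gs (off + 1) := by
  simp only [pvMatches, List.zipIdx_cons, List.flatMap_cons, List.filterMap_append,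
    List.filterMap_map]
  rfl

theorem pvMatches_ge (nl : String) :
    ∀ (gs : List (List String)) (off p : Nat), p ∈ pvMatches nl gs off → off ≤ p := by
  intro gs
  induction gs with
  | nil => intro off p hp; simp [pvMatches] at hp
  | cons g gs ih =>
    intro off p hp
    rw [pvMatches_cons] at hp
    rcases List.mem_append.mp hp with h | h
    · rcases List.mem_filterMap.mp h with ⟨k, -, hk⟩
      split_ifs at hk <;> simp_all
    · have := ih (off + 1) p h; omega

theorem pvMin_matches (nl : String) :
    ∀ (gs : List (List String)) (off : Nat),
      PySem.List.min? (pvMatches nl gs off) (fun p => p) = pvFirstIdx nl gs off := by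
  intro gs
  induction gs with
  | nil =>
    intro off
    simp [pvMatches, pvFirstIdx, PySem.List.min?_eq_none_iff]
  | cons g gs ih =>
    intro off
    by_cases hg : g.any (fun k => PySem.Str.isIn k nl) = true
    · -- some keyword of g matches: off is in the list and is a lower bound, so it is the minimum
      have hmem : off ∈ pvMatches nl (g :: gs) off := by
        rw [pvMatches_cons]
        rcases List.any_eq_true.mp hg with ⟨k, hk, hin⟩
        exact List.mem_append.mpr (Or.inl (List.mem_filterMap.mpr ⟨k, hk, by simpa using hin⟩))
      have hlb : ∀ p ∈ pvMatches nl (g :: gs) off, off ≤ p := pvMatches_ge nl _ off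
      have hne : pvMatches nl (g :: gs) off ≠ [] := List.ne_nil_of_mem hmem
      obtain ⟨m, hm⟩ : ∃ m, PySem.List.min? (pvMatches nl (g :: gs) off) (fun p => p) = some m := by
        cases hmin : PySem.List.min? (pvMatches nl (g :: gs) off) (fun p => p) with
        | none => exact absurd ((PySem.List.min?_eq_none_iff _ _).mp hmin) hne
        | some m => exact ⟨m, rfl⟩
      have hmmem := PySem.List.min?_mem hm
      have hmin := PySem.List.min?_isMin hm off hmem
      have : m = off := le_antisymm hmin (hlb m hmmem)
      rw [hm, this, pvFirstIdx, if_pos hg]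
    · -- no keyword of g matches: the g-segment contributes nothing
      have hseg : g.filterMap (fun k => if PySem.Str.isIn k nl then some off else none) = [] := by
        rw [List.filterMap_eq_nil_iff]
        intro k hk
        have : PySem.Str.isIn k nl = false := by
          by_contra h
          exact hg (List.any_eq_true.mpr ⟨k, hk, by revert h; cases PySem.Str.isIn k nl <;> simp⟩)
        simpa using this
      rw [pvMatches_cons, hseg, List.nil_append, ih (off + 1), pvFirstIdx, if_neg hg]

-- ===== VERDICT (by name: the statement is the Claim_ definition above) =====
theorem get_creator_comment_py_spec : Claim_equal_get_creator_comment_py := by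
  intro niche _
  unfold Spec_get_creator_comment_py get_creator_comment_py get_creator_comment_py_alt
  have key : ∀ nl : String,
      (PySem.List.min?
        (pvKeywordPriority.filterMap
          (fun kp => if PySem.Str.isIn kp.1 nl then some kp.2 else none))
        (fun p => p)) = pvFirstIdx nl pvGroups 0 := by
    intro nl
    have : pvKeywordPriority.filterMap
        (fun kp => if PySem.Str.isIn kp.1 nl then some kp.2 else none) = pvMatches nl pvGroups 0 := by
      simp [pvKeywordPriority, pvMatches]
    rw [this, pvMin_matches]
  cases niche with
  | none =>
    simp only [key, pvFirstIdx, pvGroups]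
    split_ifs <;> rfl
  | some s =>
    simp only [key, pvFirstIdx, pvGroups]
    split_ifs <;> rfl
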